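-- pv_equiv track=rewrite | github.com/xiransong/vgm-assets | src/vgm_assets/ai2thor_review_workspace.py | _batch_status
-- ===== SOURCE A (Python) =====
-- from typing import Any
--
-- def _batch_status(entries: list[dict[str, Any]]) -> str:
--     if not entries:
--         return "completed"
--     queue_statuses = {entry["queue_status"] for entry in entries}
--     if queue_statuses <= {"reviewed", "rejected", "deferred"}:
--         return "completed"
--     if queue_statuses == {"pending"}:
--         return "pending"
--     return "in_progress"
-- ===== SOURCE B (Python) =====
-- from typing import Any
--
-- _TERMINAL = {"reviewed", "rejected", "deferred"}
--
-- def _classify(entry: dict[str, Any]) -> str: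
--     s = entry["queue_status"]
--     if s in _TERMINAL:
--         return "completed"
--     if s == "pending":
--         return "pending"
--     return "in_progress"
--
-- def _batch_status(entries: list[dict[str, Any]]) -> str:
--     if not entries:
--         return "completed"
--     it = iter(entries)
--     acc = _classify(next(it))
--     for entry in it:
--         if _classify(entry) != acc:
--             acc = "in_progress"
--     return acc
-- ===== Notes on version B (the rewrite author's own statement) =====
-- stated objective: alternative
-- what changed: Instead of building the distinct-status set and testing subset/equality, B maps each entry independently to its own per-entry verdict (completed/pending/in_progress) and reduces these verdicts with a join in which any disagreement collapses to in_progress.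
import Mathlib
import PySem

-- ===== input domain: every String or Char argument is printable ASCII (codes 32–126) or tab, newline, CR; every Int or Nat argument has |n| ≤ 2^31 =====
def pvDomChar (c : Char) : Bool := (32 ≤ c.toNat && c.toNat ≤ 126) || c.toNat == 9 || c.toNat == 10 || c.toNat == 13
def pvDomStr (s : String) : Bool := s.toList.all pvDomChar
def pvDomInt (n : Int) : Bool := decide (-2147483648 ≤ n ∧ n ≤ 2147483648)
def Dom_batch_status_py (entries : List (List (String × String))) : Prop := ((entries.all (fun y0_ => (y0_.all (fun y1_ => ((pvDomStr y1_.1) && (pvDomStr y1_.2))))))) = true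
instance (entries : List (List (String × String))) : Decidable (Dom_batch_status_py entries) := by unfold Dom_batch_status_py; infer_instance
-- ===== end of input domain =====

-- B classifies each entry independently into a per-entry verdict and reduces the verdicts with a
-- join (any disagreement → "in_progress"), instead of A's distinct-status set with subset/equality
-- tests; equivalence of the RETURN value is proved on entries that all carry the "queue_status"
-- key (Pre_), since Python A raises KeyError otherwise.

-- ===== PORT A =====
-- entry["queue_status"] is total here via getD ""; exact under Pre_ (key present in every entry).
def batch_status_py (entries : List (List (String × String))) : String :=
  if entries = [] then "completed"
  else
    let queue_statuses : PySem.Set String :=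
      PySem.Set.ofList (entries.map (fun e => (e.lookup "queue_status").getD ""))
    if PySem.Set.issubset queue_statuses (PySem.Set.ofList ["reviewed", "rejected", "deferred"]) then
      "completed"
    else if PySem.Set.equal queue_statuses (PySem.Set.ofList ["pending"]) then
      "pending"
    else
      "in_progress"

-- ===== PORT B =====
-- per-entry verdict (the Python helper _classify)
def pvClassify (e : List (String × String)) : String :=
  let s := (e.lookup "queue_status").getD ""
  if s = "reviewed" ∨ s = "rejected" ∨ s = "deferred" then "completed"
  else if s = "pending" then "pending"
  else "in_progress"

-- reduce the per-entry verdicts with a join in which any disagreement collapses to "in_progress"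
def batch_status_py_alt (entries : List (List (String × String))) : String :=
  match entries with
  | [] => "completed"
  | h :: t =>
    t.foldl (fun acc e => if pvClassify e ≠ acc then "in_progress" else acc) (pvClassify h)

-- ===== PRECONDITION & SPEC =====
-- Pre_ excludes entries missing the "queue_status" key, on which Python A raises KeyError.
def Pre_batch_status_py (entries : List (List (String × String))) : Prop :=
  (entries.all (fun e => e.any (fun p => p.1 == "queue_status"))) = true
instance (entries : List (List (String × String))) : Decidable (Pre_batch_status_py entries) := by
  unfold Pre_batch_status_py; infer_instance

def pvWitness_batch_status_py : (List (List (String × String))) :=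
  [[("queue_status", "pending")], [("queue_status", "reviewed")]]

def Spec_batch_status_py (entries : List (List (String × String))) (out : String) : Prop := out = batch_status_py_alt entries
instance (entries : List (List (String × String))) (out : String) : Decidable (Spec_batch_status_py entries out) := by unfold Spec_batch_status_py; infer_instance

-- ===== CLAIM (what is proved, stated in full; the proofs are below) =====
def Claim_equal_batch_status_py : Prop := ∀ (entries : List (List (String × String))), Dom_batch_status_py entries → Pre_batch_status_py entries → Spec_batch_status_py entries (batch_status_py entries)

-- ===== LEMMAS AND PROOFS =====

-- the status of an entry, shared shorthand for the proofs
def pvStat (e : List (String × String)) : String := (e.lookup "queue_status").getD ""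

lemma pvFold_eq (l : List (List (String × String))) (a : String) :
    l.foldl (fun acc e => if pvClassify e ≠ acc then "in_progress" else acc) a
    = if l.all (fun e => pvClassify e == a) then a else "in_progress" := by
  induction l generalizing a with
  | nil => simp
  | cons x t ih =>
    simp only [List.foldl_cons, List.all_cons]
    by_cases hx : pvClassify x = a
    · rw [if_neg (by simp [hx]), ih]
      simp [hx]
    · rw [if_pos (by simp [hx]), ih]
      simp [hx]

lemma pvClassify_completed (e : List (String × String)) :
    pvClassify e = "completed" ↔
      (pvStat e = "reviewed" ∨ pvStat e = "rejected" ∨ pvStat e = "deferred") := by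
  simp only [pvClassify, pvStat]
  split_ifs with h1 h2 <;> simp [*]

lemma pvClassify_pending (e : List (String × String)) :
    pvClassify e = "pending" ↔ pvStat e = "pending" := by
  simp only [pvClassify, pvStat]
  split_ifs with h1 h2
  · rcases h1 with h | h | h <;> simp [h]
  · simp [h2]
  · simp [h2]

lemma pvClassify_tri (e : List (String × String)) :
    pvClassify e = "completed" ∨ pvClassify e = "pending" ∨ pvClassify e = "in_progress" := by
  simp only [pvClassify]
  split_ifs <;> simp

lemma pvSubset_iff (l : List String) :
    PySem.Set.issubset (PySem.Set.ofList l) (PySem.Set.ofList ["reviewed", "rejected", "deferred"]) = true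
    ↔ l.all (fun s => s == "reviewed" || s == "rejected" || s == "deferred") = true := by
  rw [PySem.Set.issubset_iff, List.all_eq_true]
  constructor
  · intro h s hs
    have := h s (by simpa [PySem.Set.mem_ofList] using hs)
    simp [PySem.Set.mem_ofList] at this
    rcases this with h | h | h <;> simp [h]
  · intro h x hx
    have := h x (by simpa [PySem.Set.mem_ofList] using hx)
    simp only [Bool.or_eq_true, beq_iff_eq] at this
    simp [PySem.Set.mem_ofList]
    tauto

lemma pvEqual_iff (l : List String) (hne : l ≠ []) :
    PySem.Set.equal (PySem.Set.ofList l) (PySem.Set.ofList ["pending"]) = true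
    ↔ l.all (fun s => s == "pending") = true := by
  rw [PySem.Set.equal_iff, List.all_eq_true]
  constructor
  · intro h s hs
    have := (h s).mp (by simpa [PySem.Set.mem_ofList] using hs)
    simp [PySem.Set.mem_ofList] at this
    simp [this]
  · intro h x
    simp only [PySem.Set.mem_ofList]
    constructor
    · intro hx
      have := h x hx
      simp only [beq_iff_eq] at this
      simp [this]
    · intro hx
      rcases List.exists_mem_of_ne_nil l hne with ⟨y, hy⟩
      have hyp := h y hy
      simp only [beq_iff_eq] at hyp
      simp only [List.mem_cons, List.not_mem_nil, or_false] at hx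
      subst hx; rw [← hyp]; exact hy

-- A's first condition, read off as "every entry classifies to completed"
lemma pvTerm_iff (h : List (String × String)) (t : List (List (String × String))) :
    PySem.Set.issubset
        (PySem.Set.ofList ((h :: t).map (fun e => (e.lookup "queue_status").getD "")))
        (PySem.Set.ofList ["reviewed", "rejected", "deferred"]) = true
    ↔ ∀ e ∈ h :: t, pvClassify e = "completed" := by
  rw [pvSubset_iff, List.all_map, List.all_eq_true]
  constructor
  · intro hA e he
    have := hA e he
    simp only [Function.comp, Bool.or_eq_true, beq_iff_eq] at this
    rw [pvClassify_completed]
    unfold pvStat; tauto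
  · intro hB e he
    have := (pvClassify_completed e).mp (hB e he)
    unfold pvStat at this
    simp only [Function.comp, Bool.or_eq_true, beq_iff_eq]
    tauto

-- A's second condition, read off as "every entry classifies to pending"
lemma pvPend_iff (h : List (String × String)) (t : List (List (String × String))) :
    PySem.Set.equal
        (PySem.Set.ofList ((h :: t).map (fun e => (e.lookup "queue_status").getD "")))
        (PySem.Set.ofList ["pending"]) = true
    ↔ ∀ e ∈ h :: t, pvClassify e = "pending" := by
  rw [pvEqual_iff _ (by simp), List.all_map, List.all_eq_true]
  constructor
  · intro hA e he
    have := hA e he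
    simp only [Function.comp, beq_iff_eq] at this
    rw [pvClassify_pending]
    unfold pvStat; exact this
  · intro hB e he
    have := (pvClassify_pending e).mp (hB e he)
    unfold pvStat at this
    simp only [Function.comp, beq_iff_eq]
    exact this

-- B's fold condition, read off as "every entry classifies like the head"
lemma pvAll_iff (h : List (String × String)) (t : List (List (String × String))) :
    (t.all (fun e => pvClassify e == pvClassify h)) = true
    ↔ ∀ e ∈ h :: t, pvClassify e = pvClassify h := by
  rw [List.all_eq_true]
  constructor
  · intro hA e he
    rcases List.mem_cons.mp he with rfl | he'
    · rfl
    · simpa using hA e he'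
  · intro hB e he
    simpa using hB e (List.mem_cons_of_mem h he)

-- ===== VERDICT (by name: the statement is the Claim_ definition above) =====
theorem batch_status_py_spec : Claim_equal_batch_status_py := by
  intro entries _ _
  unfold Spec_batch_status_py
  match entries with
  | [] => rfl
  | h :: t =>
    simp only [batch_status_py, batch_status_py_alt, pvFold_eq]
    rw [if_neg (by simp)]
    split_ifs with h1 h2 h3 h4 h5
    · -- all terminal, fold condition holds: head classifies to "completed"
      exact ((pvTerm_iff h t).mp h1 h (by simp)).symm
    · -- all terminal but fold condition fails: impossible
      exact absurd ((pvAll_iff h t).mpr (fun e he => by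
        rw [(pvTerm_iff h t).mp h1 e he, (pvTerm_iff h t).mp h1 h (by simp)])) h2
    · -- all pending, fold condition holds: head classifies to "pending"
      exact ((pvPend_iff h t).mp h3 h (by simp)).symm
    · -- all pending but fold condition fails: impossible
      exact absurd ((pvAll_iff h t).mpr (fun e he => by
        rw [(pvPend_iff h t).mp h3 e he, (pvPend_iff h t).mp h3 h (by simp)])) h4
    · -- mixed statuses, fold condition holds: the shared verdict can only be "in_progress"
      have hall := (pvAll_iff h t).mp h5
      rcases pvClassify_tri h with hc | hc | hc
      · exact absurd ((pvTerm_iff h t).mpr (fun e he => by rw [hall e he, hc])) h1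
      · exact absurd ((pvPend_iff h t).mpr (fun e he => by rw [hall e he, hc])) h3
      · exact hc.symm
    · rfl
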